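-- pv_equiv track=rewrite | github.com/XJQ232/2024-fall-semester-course | 计算概论B/program code/Maximal Binary Matrix.py | work
-- ===== SOURCE A (Python) =====
-- def work(mat, number, size,index):
--     if not number:
--         return mat
--     if number >= size*2 - 1:
--         for i in range(size):
--             mat[index][i+index] = mat[i+index][index] = 1
--         if number == size*2 - 1:return mat
--         return work(mat, number-size*2 + 1, size-1,index+1)
--     else:
--         if number % 2:
--             number = (number+1)//2
--             for i in range(number):
--                 mat[index][i+index]=mat[i+index][index]=1
--             return mat
--         else:
--             number = (number+1)//2
--             for i in range(number):
--                 mat[index][i+index]=mat[i+index][index]=1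
--             mat[1+index][1+index]=1
--             return mat
-- ===== SOURCE B (Python) =====
-- def _ceil_sqrt(n):
--     # smallest m >= 0 with m*m >= n
--     m = 0
--     while m * m < n:
--         m += 1
--     return m
--
--
-- def work(mat, number, size, index):
--     # Equivalence is about the return value; like A, this mutates mat in place.
--     if not number:
--         return mat
--     rem = size * size - number          # cells that stay untouched
--     mfin = _ceil_sqrt(rem)              # side of the deepest untouched square
--     d0 = index + size - mfin            # first partially-filled layer
--     for a in range(index, d0):          # all complete L-borders at once
--         for b in range(a, index + size):
--             mat[a][b] = 1
--             mat[b][a] = 1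
--     r = number - (size * size - mfin * mfin)   # cells left for the partial border
--     if r:
--         k = (r + 1) // 2
--         for i in range(k):
--             mat[d0][d0 + i] = 1
--             mat[d0 + i][d0] = 1
--         if r % 2 == 0:
--             mat[d0 + 1][d0 + 1] = 1
--     return mat
-- ===== Notes on version B (the rewrite author's own statement) =====
-- stated objective: alternative
-- what changed: A peels complete L-borders one at a time by tail recursion; B computes the side of the deepest untouched square in closed form (integer ceil-sqrt of size*size-number), fills all complete borders in a single double loop and then the one partial border, with no recursion or repeated subtraction.
-- outside the precondition, e.g. on work([[], [], [], [5, 3]], -3, 0, 0): A returns [[], [], [], [5, 3]], B raises IndexError; on work([[0, 0], [0, 0]], 3, 2, -1): A returns [[0, 1], [1, 1]], B returns [[0, 1], [1, 1]]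
import Mathlib
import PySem

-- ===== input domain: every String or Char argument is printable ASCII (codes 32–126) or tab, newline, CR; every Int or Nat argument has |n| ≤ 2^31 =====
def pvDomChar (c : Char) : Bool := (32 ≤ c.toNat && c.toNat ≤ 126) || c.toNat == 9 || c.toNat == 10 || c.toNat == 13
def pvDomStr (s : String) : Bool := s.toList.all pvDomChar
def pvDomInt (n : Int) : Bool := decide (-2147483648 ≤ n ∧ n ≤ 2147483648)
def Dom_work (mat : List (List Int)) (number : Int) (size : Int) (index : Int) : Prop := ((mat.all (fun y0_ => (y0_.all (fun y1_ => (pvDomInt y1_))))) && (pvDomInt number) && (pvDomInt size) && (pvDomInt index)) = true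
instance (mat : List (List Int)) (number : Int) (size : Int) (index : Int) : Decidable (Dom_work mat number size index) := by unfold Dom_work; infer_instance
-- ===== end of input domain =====

-- B replaces A's border-peeling tail recursion by a closed-form computation (integer ceil-sqrt
-- of size^2-number gives the deepest untouched square) plus one double loop; equivalence is
-- about the RETURN value (both Pythons mutate mat in place and return it).

-- Shared primitive: the Python in-place write mat[r][c] = 1, with Python's negative-index
-- wraparound; where Python raises IndexError (out of range, excluded by Pre_work) it is a no-op.
def pyIdxAbs (len : Nat) (i : Int) : Option Nat :=
  if 0 ≤ i then (if i < (len : Int) then some i.toNat else none)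
  else (if 0 ≤ i + len then some (i + len).toNat else none)

def setCell (mat : List (List Int)) (r c : Int) : List (List Int) :=
  match pyIdxAbs mat.length r with
  | none => mat
  | some rn =>
      match pyIdxAbs (mat.getD rn []).length c with
      | none => mat
      | some cn => mat.set rn ((mat.getD rn []).set cn 1)

-- ===== PORT A =====
def workFuel : Nat → List (List Int) → Int → Int → Int → List (List Int)
  | 0, mat, _, _, _ => mat   -- fuel guard only; never reached on Pre_work inputs
  | fuel+1, mat, number, size, index =>
      if number = 0 then mat
      else if size*2 - 1 ≤ number then
        let mat' := (PySem.List.pyRange 0 size 1).foldl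
            (fun m i => setCell (setCell m index (i+index)) (i+index) index) mat
        if number = size*2 - 1 then mat'
        else workFuel fuel mat' (number - size*2 + 1) (size-1) (index+1)
      else
        if PySem.Int.mod number 2 ≠ 0 then
          let k := PySem.Int.floordiv (number+1) 2
          (PySem.List.pyRange 0 k 1).foldl
            (fun m i => setCell (setCell m index (i+index)) (i+index) index) mat
        else
          let k := PySem.Int.floordiv (number+1) 2
          let mat' := (PySem.List.pyRange 0 k 1).foldl
            (fun m i => setCell (setCell m index (i+index)) (i+index) index) mat
          setCell mat' (1+index) (1+index)

def work (mat : List (List Int)) (number : Int) (size : Int) (index : Int) : List (List Int) :=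
  workFuel (size.toNat + 1) mat number size index

-- ===== PORT B =====
-- Source B's _ceil_sqrt: smallest m ≥ 0 with m*m ≥ n
def ceilSqrtAux (n : Int) (m : Nat) : Nat :=
  if (m:Int) * m < n then ceilSqrtAux n (m+1) else m
termination_by n.toNat - m
decreasing_by
  rename_i h
  have h2 : (m:Int) ≤ (m:Int)*(m:Int) := by nlinarith
  have h3 : (m:Int) < n := by linarith
  omega

def work_alt (mat : List (List Int)) (number : Int) (size : Int) (index : Int) : List (List Int) :=
  if number = 0 then mat
  else
    let rem := size*size - number
    let mfin : Int := (ceilSqrtAux rem 0 : Int)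
    let d0 := index + size - mfin
    let mat' := (PySem.List.pyRange index d0 1).foldl
        (fun m a => (PySem.List.pyRange a (index+size) 1).foldl
            (fun m b => setCell (setCell m a b) b a) m) mat
    let r := number - (size*size - mfin*mfin)
    if r ≠ 0 then
      let k := PySem.Int.floordiv (r+1) 2
      let mat'' := (PySem.List.pyRange 0 k 1).foldl
          (fun m i => setCell (setCell m d0 (d0+i)) (d0+i) d0) mat'
      if PySem.Int.mod r 2 = 0 then setCell mat'' (d0+1) (d0+1) else mat''
    else mat'

-- ===== PRECONDITION & SPEC =====
-- Pre_work is the natural domain: a consistent geometry (0 ≤ index, rows/columns long enough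
-- for the square of side `size` placed at offset `index`) and 0 < number ≤ size².  Outside it
-- A raises IndexError or RecursionError on most inputs; on the rest (negative-index wraparound,
-- size inconsistent with mat's shape while all writes happen to land) A returns a value that is
-- an accident of Python's indexing, excluded as outside the natural domain.
def Pre_work (mat : List (List Int)) (number : Int) (size : Int) (index : Int) : Prop :=
  number = 0 ∨
    (0 ≤ index ∧ 0 < size ∧ 0 < number ∧ number ≤ size*size ∧
     index + size ≤ (mat.length : Int) ∧ ∀ row ∈ mat, index + size ≤ (row.length : Int))
instance (mat : List (List Int)) (number : Int) (size : Int) (index : Int) : Decidable (Pre_work mat number size index) := by unfold Pre_work; infer_instance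

def pvWitness_work : List (List Int) × Int × Int × Int := ([[0,0],[0,0]], 3, 2, 0)

def Spec_work (mat : List (List Int)) (number : Int) (size : Int) (index : Int) (out : List (List Int)) : Prop := out = work_alt mat number size index
instance (mat : List (List Int)) (number : Int) (size : Int) (index : Int) (out : List (List Int)) : Decidable (Spec_work mat number size index out) := by unfold Spec_work; infer_instance

-- ===== CLAIM (what is proved, stated in full; the proofs are below) =====
def Claim_equal_work : Prop := ∀ (mat : List (List Int)) (number : Int) (size : Int) (index : Int), Dom_work mat number size index → Pre_work mat number size index → Spec_work mat number size index (work mat number size index)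

-- ===== LEMMAS AND PROOFS =====

theorem csa_spec (n : Int) (m : Nat) (hlt : ∀ j : Nat, j < m → (j:Int)*j < n) :
    n ≤ (ceilSqrtAux n m : Int)*(ceilSqrtAux n m) ∧
      ∀ j : Nat, j < ceilSqrtAux n m → (j:Int)*j < n := by
  fun_induction ceilSqrtAux n m with
  | case1 m h ih =>
      refine ih ?_
      intro j hj
      rcases Nat.lt_succ_iff_lt_or_eq.mp hj with h' | rfl
      · exact hlt j h'
      · exact h
  | case2 m h =>
      constructor
      · linarith [not_lt.mp h]
      · exact hlt

theorem csa_eq (n : Int) (t : Nat) (h1 : n ≤ (t:Int)*t) (h2 : ∀ j : Nat, j < t → (j:Int)*j < n) :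
    ceilSqrtAux n 0 = t := by
  obtain ⟨hA, hB⟩ := csa_spec n 0 (by intro j hj; omega)
  by_contra hne
  rcases Nat.lt_or_ge (ceilSqrtAux n 0) t with h | h
  · exact absurd hA (by have := h2 _ h; linarith)
  · have ht : t < ceilSqrtAux n 0 := by omega
    have := hB t ht
    linarith

theorem foldl_range_shift (f : List (List Int) → Int → List (List Int)) (a n : Int) (mat : List (List Int)) :
    (PySem.List.pyRange a (a+n) 1).foldl f mat
      = (PySem.List.pyRange 0 n 1).foldl (fun m i => f m (i+a)) mat := by
  rw [PySem.List.pyRange_one, PySem.List.pyRange_one, List.foldl_map, List.foldl_map]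
  have h1 : a + n - a = n := by ring
  rw [h1, sub_zero]
  congr 1
  funext m k
  congr 1
  ring

theorem work_main (fuel : Nat) : ∀ (mat : List (List Int)) (number size index : Int),
    size.toNat < fuel → 0 ≤ size → 0 ≤ number → number ≤ size*size →
    workFuel fuel mat number size index = work_alt mat number size index := by
  induction fuel with
  | zero => intro _ _ _ _ h; omega
  | succ f ih =>
    intro mat number size index hf hsz hn0 hn1
    by_cases hz : number = 0
    · subst hz; simp [workFuel, work_alt]
    have hnpos : 0 < number := lt_of_le_of_ne hn0 (Ne.symm hz)
    have hs1 : 1 ≤ size := by nlinarith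
    by_cases hb : size*2 - 1 ≤ number
    · by_cases heq : number = size*2 - 1
      · -- exact full border: A returns after the fill; B fills exactly one layer, r = 0
        have hm : ceilSqrtAux (size*size - number) 0 = (size-1).toNat := by
          apply csa_eq
          · have hc : (((size-1).toNat : Nat) : Int) = size - 1 := by omega
            rw [hc]; nlinarith
          · intro j hj
            have hc : (j : Int) < size - 1 := by omega
            have hj0 : (0:Int) ≤ j := by positivity
            nlinarith
        simp only [workFuel, work_alt, if_neg hz, if_pos hb, if_pos heq, hm]
        have hc2 : (((size-1).toNat : Nat) : Int) = size - 1 := by omega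
        rw [hc2]
        have hd0 : index + size - (size-1) = index + 1 := by ring
        rw [hd0]
        have hr : number - (size*size - (size-1)*(size-1)) = 0 := by rw [heq]; ring
        rw [hr]
        simp only [ne_eq, not_true_eq_false, if_false]
        rw [PySem.List.pyRange_one_singleton, List.foldl_cons, List.foldl_nil]
        rw [foldl_range_shift]
      · -- number > size*2-1: A fills the border and recurses; B's outer loop peels one layer
        have hmle : ((ceilSqrtAux (size*size - number) 0 : Nat) : Int) ≤ size - 1 := by
          by_contra hgt
          push Not at hgt
          obtain ⟨_, hB⟩ := csa_spec (size*size - number) 0 (by intro j hj; omega)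
          have hlt : (size-1).toNat < ceilSqrtAux (size*size - number) 0 := by omega
          have h5 := hB _ hlt
          have hc : (((size-1).toNat : Nat) : Int) = size - 1 := by omega
          rw [hc] at h5
          have hge : size*2 ≤ number := by omega
          nlinarith
        have hfa : (size-1).toNat < f := by omega
        have hsa : (0:Int) ≤ size - 1 := by omega
        have hna : (0:Int) ≤ number - size*2 + 1 := by omega
        have hnb : number - size*2 + 1 ≤ (size-1)*(size-1) := by nlinarith
        simp only [workFuel, if_neg hz, if_pos hb, if_neg heq]
        rw [ih _ _ _ _ hfa hsa hna hnb]
        have hz' : ¬(number - size*2 + 1 = 0) := by omega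
        simp only [work_alt, if_neg hz, if_neg hz']
        rw [show (size-1)*(size-1) - (number - size*2 + 1) = size*size - number from by ring]
        rw [show index + 1 + (size - 1) = index + size from by ring]
        rw [show number - size*2 + 1 - ((size-1)*(size-1)
              - ((ceilSqrtAux (size*size - number) 0 : Nat) : Int)
                * ((ceilSqrtAux (size*size - number) 0 : Nat) : Int))
            = number - (size*size
              - ((ceilSqrtAux (size*size - number) 0 : Nat) : Int)
                * ((ceilSqrtAux (size*size - number) 0 : Nat) : Int)) from by ring]
        have hcons : index < index + size - ((ceilSqrtAux (size*size - number) 0 : Nat) : Int) := by omega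
        rw [PySem.List.pyRange_one_cons hcons, List.foldl_cons]
        rw [foldl_range_shift (fun m b => setCell (setCell m index b) b index) index size mat]
    · -- 0 < number < size*2-1: partial border only; B's outer loop is empty and r = number
      have hm : ceilSqrtAux (size*size - number) 0 = size.toNat := by
        apply csa_eq
        · have hc : ((size.toNat : Nat) : Int) = size := by omega
          rw [hc]; nlinarith
        · intro j hj
          have hc : (j:Int) < size := by omega
          have hj0 : (0:Int) ≤ (j:Int) := by positivity
          nlinarith [mul_self_nonneg ((size - 1) - (j:Int))]
      simp only [workFuel, work_alt, if_neg hz, if_neg hb, hm]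
      have hc : ((size.toNat : Nat) : Int) = size := by omega
      rw [hc]
      rw [show index + size - size = index from by ring]
      rw [PySem.List.pyRange_one_eq_nil (le_refl index), List.foldl_nil]
      rw [show number - (size*size - size*size) = number from by ring]
      rw [if_pos hz]
      have hfun : (fun (m : List (List Int)) (i : Int) =>
            setCell (setCell m index (index+i)) (index+i) index)
          = (fun (m : List (List Int)) (i : Int) =>
            setCell (setCell m index (i+index)) (i+index) index) := by
        funext m i; rw [Int.add_comm index i]
      by_cases hpar : PySem.Int.mod number 2 = 0
      · rw [hfun, show index + 1 = 1 + index from by ring,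
            if_pos hpar, if_neg (not_not_intro hpar)]
      · simp only [if_pos hpar, if_neg hpar]
        rw [hfun]
  

-- ===== VERDICT (by name: the statement is the Claim_ definition above) =====
theorem work_spec : Claim_equal_work := by
  intro mat number size index _hdom hpre
  unfold Spec_work
  rcases hpre with rfl | ⟨hi, hs, hn0, hn1, _, _⟩
  · simp [work, workFuel, work_alt]
  · exact (work_main (size.toNat+1) mat number size index (by omega) (by omega) (by omega) hn1).symm ▸ rfl
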